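-- pv_equiv track=rewrite | github.com/nico-fernandez/parser-py | Terminals/OP.py | OP_automata
-- ===== SOURCE A (Python) =====
-- TRAP_STATE = -1
--
-- RESULT_TRAP = "RESULT_TRAP"
--
-- RESULT_ACCEPTED = "ACCEPTED"
--
-- RESULT_NOT_ACCEPTED = "NOT ACCEPTED"
--
-- def OP_delta(state, character):
--     if state == 0 and (character == "+" or character == "-" or character == "/" or character == "*"):
--         return 1
--     if state == 0 and character == "=":
--         return 2
--     if state == 0 and character == "!":
--         return 3
--     if state == 0 and character == "<":
--         return 13
--     if state == 0 and character == ">":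
--         return 13
--     if state == 2 and character == "=":
--         return 4
--     if state == 3 and character == "=":
--         return 5
--     if state == 0 and character == "m":
--         return 6
--     if state == 6 and character == "o":
--         return 7
--     if state == 7 and character == "d":
--         return 8
--     if state == 0 and character == "d":
--         return 9
--     if state == 9 and character == "i":
--         return 10
--     if state == 10 and character == "v":
--         return 11
--     if state == 13 and character == "=":
--         return 14
--     if state == 0 and character == "o":
--         return 15
--     if state == 15 and character == "r":
--         return 16
--     if state == 0 and character == "a":
--         return 17
--     if state == 17 and character == "n":
--         return 18
--     if state == 18 and character == "d":
--         return 19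
--
--     return TRAP_STATE
--
-- def OP_automata(input):
--     finals= [1, 4, 5, 8, 11, 13, 14, 16, 19]
--     state = 0
--
--     for character in input:
--         if state == TRAP_STATE:
--             break
--         next_state = OP_delta(state, character)
--         state = next_state
--     if state in finals:
--         return RESULT_ACCEPTED
--     if state == TRAP_STATE:
--         return RESULT_TRAP
--
--     return RESULT_NOT_ACCEPTED
-- ===== SOURCE B (Python) =====
-- # B: instead of running a DFA, test the input directly against the fixed token
-- # set: exact match -> ACCEPTED, proper prefix of a token -> NOT ACCEPTED, else RESULT_TRAP.
-- _TOKENS = [list(t) for t in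
--            ["+", "-", "/", "*", "==", "!=", "<", ">", "<=", ">=", "mod", "div", "or", "and"]]
--
-- def _prefix_result(toks, elems):
--     if elems in toks:
--         return "ACCEPTED"
--     if any(len(elems) < len(t) and t[:len(elems)] == elems for t in toks):
--         return "NOT ACCEPTED"
--     return "RESULT_TRAP"
--
-- def OP_automata(input):
--     return _prefix_result(_TOKENS, list(input))
-- ===== Notes on version B (the rewrite author's own statement) =====
-- stated objective: simpler
-- what changed: Replaced the hand-coded 20-state DFA (delta if-chain plus loop with trap break) by a direct test of the input against the fixed token list: exact match -> ACCEPTED, proper prefix of a token -> NOT ACCEPTED, otherwise RESULT_TRAP.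
import Mathlib
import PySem

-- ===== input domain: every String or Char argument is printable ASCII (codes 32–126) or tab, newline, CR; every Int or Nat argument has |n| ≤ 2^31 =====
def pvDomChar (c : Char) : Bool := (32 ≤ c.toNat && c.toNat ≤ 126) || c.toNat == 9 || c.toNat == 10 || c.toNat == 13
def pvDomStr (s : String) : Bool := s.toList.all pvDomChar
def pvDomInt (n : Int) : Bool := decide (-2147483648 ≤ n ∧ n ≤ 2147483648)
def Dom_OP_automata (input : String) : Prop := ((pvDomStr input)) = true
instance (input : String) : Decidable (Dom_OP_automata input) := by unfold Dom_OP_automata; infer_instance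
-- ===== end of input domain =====

-- B replaces A's 20-state DFA by a direct match / proper-prefix test against the token list (simpler).

-- ===== PORT A =====
def OP_delta (state : Int) (character : Char) : Int :=
  if state = 0 ∧ (character = '+' ∨ character = '-' ∨ character = '/' ∨ character = '*') then 1
  else if state = 0 ∧ character = '=' then 2
  else if state = 0 ∧ character = '!' then 3
  else if state = 0 ∧ character = '<' then 13
  else if state = 0 ∧ character = '>' then 13
  else if state = 2 ∧ character = '=' then 4
  else if state = 3 ∧ character = '=' then 5
  else if state = 0 ∧ character = 'm' then 6
  else if state = 6 ∧ character = 'o' then 7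
  else if state = 7 ∧ character = 'd' then 8
  else if state = 0 ∧ character = 'd' then 9
  else if state = 9 ∧ character = 'i' then 10
  else if state = 10 ∧ character = 'v' then 11
  else if state = 13 ∧ character = '=' then 14
  else if state = 0 ∧ character = 'o' then 15
  else if state = 15 ∧ character = 'r' then 16
  else if state = 0 ∧ character = 'a' then 17
  else if state = 17 ∧ character = 'n' then 18
  else if state = 18 ∧ character = 'd' then 19
  else -1

-- the for-loop of A, with its 'break' on the trap state
def opLoop : Int → List Char → Int
  | s, [] => s
  | s, c :: rest => if s = -1 then s else opLoop (OP_delta s c) rest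

def OP_automata (input : String) : String :=
  let finals : List Int := [1, 4, 5, 8, 11, 13, 14, 16, 19]
  let state := opLoop 0 input.toList
  if finals.contains state then "ACCEPTED"
  else if state = -1 then "RESULT_TRAP"
  else "NOT ACCEPTED"

-- ===== PORT B =====
def opTokens : List (List Char) :=
  [['+'], ['-'], ['/'], ['*'], ['=','='], ['!','='], ['<'], ['>'],
   ['<','='], ['>','='], ['m','o','d'], ['d','i','v'], ['o','r'], ['a','n','d']]

def prefixResult (toks : List (List Char)) (elems : List Char) : String :=
  if toks.contains elems then "ACCEPTED"
  else if toks.any (fun t => elems.length < t.length && t.take elems.length == elems) then "NOT ACCEPTED"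
  else "RESULT_TRAP"

def OP_automata_alt (input : String) : String :=
  prefixResult opTokens input.toList

-- ===== PRECONDITION & SPEC =====
def Spec_OP_automata (input : String) (out : String) : Prop := out = OP_automata_alt input
instance (input : String) (out : String) : Decidable (Spec_OP_automata input out) := by unfold Spec_OP_automata; infer_instance

-- ===== CLAIM (what is proved, stated in full; the proofs are below) =====
def Claim_equal_OP_automata : Prop := ∀ (input : String), Dom_OP_automata input → Spec_OP_automata input (OP_automata input)

-- ===== LEMMAS AND PROOFS =====

-- residual token suffixes associated with each DFA state
def resOf (s : Int) : List (List Char) :=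
  if s = 0 then opTokens
  else if s = 1 then [[]]
  else if s = 2 then [['=']]
  else if s = 3 then [['=']]
  else if s = 4 then [[]]
  else if s = 5 then [[]]
  else if s = 6 then [['o','d']]
  else if s = 7 then [['d']]
  else if s = 8 then [[]]
  else if s = 9 then [['i','v']]
  else if s = 10 then [['v']]
  else if s = 11 then [[]]
  else if s = 13 then [[], ['=']]
  else if s = 14 then [[]]
  else if s = 15 then [['r']]
  else if s = 16 then [[]]
  else if s = 17 then [['n','d']]
  else if s = 18 then [['d']]
  else if s = 19 then [[]]
  else []

def reachList : List Int := [-1, 0, 1, 2, 3, 4, 5, 6, 7, 8, 9, 10, 11, 13, 14, 15, 16, 17, 18, 19]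

def finCheck (s : Int) : String :=
  if ([1, 4, 5, 8, 11, 13, 14, 16, 19] : List Int).contains s then "ACCEPTED"
  else if s = -1 then "RESULT_TRAP"
  else "NOT ACCEPTED"

def pvDeriv (c : Char) (R : List (List Char)) : List (List Char) :=
  R.filterMap (fun r => match r with
    | [] => none
    | c' :: r' => if c' = c then some r' else none)

theorem opLoop_trap (l : List Char) : opLoop (-1) l = -1 := by
  cases l <;> simp [opLoop]

theorem pvDeriv_nil_cons (c : Char) (R : List (List Char)) :
    pvDeriv c ([] :: R) = pvDeriv c R := by
  simp [pvDeriv]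

theorem pvDeriv_cons (c c' : Char) (r' : List Char) (R : List (List Char)) :
    pvDeriv c ((c' :: r') :: R) = if c' = c then r' :: pvDeriv c R else pvDeriv c R := by
  by_cases h : c' = c <;> simp [pvDeriv, List.filterMap_cons, h]

theorem mem_pvDeriv (c : Char) (l : List Char) (R : List (List Char)) :
    (c :: l) ∈ R ↔ l ∈ pvDeriv c R := by
  induction R with
  | nil => simp [pvDeriv]
  | cons r R ih =>
    cases r with
    | nil => rw [pvDeriv_nil_cons]; simp [← ih]
    | cons c' r' =>
      rw [pvDeriv_cons]
      by_cases h : c' = c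
      · subst h; simp [← ih]
      · simp [h, Ne.symm h, ← ih]

theorem pref_pvDeriv (c : Char) (l : List Char) (R : List (List Char)) :
    (∃ t ∈ R, (c :: l).length < t.length ∧ t.take (c :: l).length = c :: l) ↔
    (∃ t ∈ pvDeriv c R, l.length < t.length ∧ t.take l.length = l) := by
  induction R with
  | nil => simp [pvDeriv]
  | cons r R ih =>
    simp only [List.length_cons] at ih ⊢
    cases r with
    | nil => rw [pvDeriv_nil_cons]; simpa using ih
    | cons c' r' =>
      by_cases h : c' = c
      · subst h
        rw [pvDeriv_cons, if_pos rfl]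
        simp only [List.mem_cons]
        constructor
        · rintro ⟨t, rfl | ht, hlen, htake⟩
          · rw [List.take_succ_cons] at htake
            injection htake with _ h2
            exact ⟨r', Or.inl rfl, by simpa using hlen, h2⟩
          · rcases ih.mp ⟨t, ht, hlen, htake⟩ with ⟨u, hu, h1, h2⟩
            exact ⟨u, Or.inr hu, h1, h2⟩
        · rintro ⟨t, rfl | ht, hlen, htake⟩
          · exact ⟨c' :: t, Or.inl rfl, by simpa using hlen,
              by rw [List.take_succ_cons, htake]⟩
          · rcases ih.mpr ⟨t, ht, hlen, htake⟩ with ⟨u, hu, h1, h2⟩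
            exact ⟨u, Or.inr hu, h1, h2⟩
      · rw [pvDeriv_cons, if_neg h]
        rw [← ih]
        simp only [List.mem_cons]
        constructor
        · rintro ⟨t, rfl | ht, hlen, htake⟩
          · rw [List.take_succ_cons] at htake
            injection htake with h1 _
            exact absurd h1 h
          · exact ⟨t, ht, hlen, htake⟩
        · rintro ⟨t, ht, hlen, htake⟩
          exact ⟨t, Or.inr ht, hlen, htake⟩

theorem prefixResult_deriv (c : Char) (l : List Char) (R : List (List Char)) :
    prefixResult R (c :: l) = prefixResult (pvDeriv c R) l := by
  have h1 : R.contains (c :: l) = (pvDeriv c R).contains l := by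
    rw [Bool.eq_iff_iff]; simp [mem_pvDeriv]
  have h2 : (R.any (fun t => (c :: l).length < t.length && t.take (c :: l).length == (c :: l)))
      = ((pvDeriv c R).any (fun t => l.length < t.length && t.take l.length == l)) := by
    rw [Bool.eq_iff_iff]
    simpa using pref_pvDeriv c l R
  rw [prefixResult, prefixResult, h1, h2]

theorem main_lemma (l : List Char) :
    ∀ s : Int, s ∈ reachList → finCheck (opLoop s l) = prefixResult (resOf s) l := by
  induction l with
  | nil => intro s hs; fin_cases hs <;> decide
  | cons c l ih =>
    intro s hs
    by_cases hneg : s = -1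
    · subst hneg
      rfl
    · have step : opLoop s (c :: l) = opLoop (OP_delta s c) l := by
        simp [opLoop, hneg]
      rw [step, prefixResult_deriv]
      fin_cases hs
      · exact absurd rfl hneg
      · -- s = 0
        by_cases h0 : c = '+'
        · subst h0
          rw [show OP_delta 0 '+' = 1 from by decide, show pvDeriv '+' (resOf 0) = resOf 1 from by decide]
          exact ih 1 (by decide)
        by_cases h1 : c = '-'
        · subst h1
          rw [show OP_delta 0 '-' = 1 from by decide, show pvDeriv '-' (resOf 0) = resOf 1 from by decide]
          exact ih 1 (by decide)
        by_cases h2 : c = '/'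
        · subst h2
          rw [show OP_delta 0 '/' = 1 from by decide, show pvDeriv '/' (resOf 0) = resOf 1 from by decide]
          exact ih 1 (by decide)
        by_cases h3 : c = '*'
        · subst h3
          rw [show OP_delta 0 '*' = 1 from by decide, show pvDeriv '*' (resOf 0) = resOf 1 from by decide]
          exact ih 1 (by decide)
        by_cases h4 : c = '='
        · subst h4
          rw [show OP_delta 0 '=' = 2 from by decide, show pvDeriv '=' (resOf 0) = resOf 2 from by decide]
          exact ih 2 (by decide)
        by_cases h5 : c = '!'
        · subst h5
          rw [show OP_delta 0 '!' = 3 from by decide, show pvDeriv '!' (resOf 0) = resOf 3 from by decide]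
          exact ih 3 (by decide)
        by_cases h6 : c = '<'
        · subst h6
          rw [show OP_delta 0 '<' = 13 from by decide, show pvDeriv '<' (resOf 0) = resOf 13 from by decide]
          exact ih 13 (by decide)
        by_cases h7 : c = '>'
        · subst h7
          rw [show OP_delta 0 '>' = 13 from by decide, show pvDeriv '>' (resOf 0) = resOf 13 from by decide]
          exact ih 13 (by decide)
        by_cases h8 : c = 'm'
        · subst h8
          rw [show OP_delta 0 'm' = 6 from by decide, show pvDeriv 'm' (resOf 0) = resOf 6 from by decide]
          exact ih 6 (by decide)
        by_cases h9 : c = 'd'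
        · subst h9
          rw [show OP_delta 0 'd' = 9 from by decide, show pvDeriv 'd' (resOf 0) = resOf 9 from by decide]
          exact ih 9 (by decide)
        by_cases h10 : c = 'o'
        · subst h10
          rw [show OP_delta 0 'o' = 15 from by decide, show pvDeriv 'o' (resOf 0) = resOf 15 from by decide]
          exact ih 15 (by decide)
        by_cases h11 : c = 'a'
        · subst h11
          rw [show OP_delta 0 'a' = 17 from by decide, show pvDeriv 'a' (resOf 0) = resOf 17 from by decide]
          exact ih 17 (by decide)
        · rw [show pvDeriv c (resOf 0) = [] from by simp [pvDeriv, resOf, opTokens, Ne.symm h0, Ne.symm h1, Ne.symm h2, Ne.symm h3, Ne.symm h4, Ne.symm h5, Ne.symm h6, Ne.symm h7, Ne.symm h8, Ne.symm h9, Ne.symm h10, Ne.symm h11],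
              show OP_delta 0 c = -1 from by simp [OP_delta, h0, h1, h2, h3, h4, h5, h6, h7, h8, h9, h10, h11], opLoop_trap]
          rfl
      · -- s = 1 (no outgoing transitions)
        rw [show pvDeriv c (resOf 1) = [] from rfl,
            show OP_delta 1 c = -1 from by simp [OP_delta], opLoop_trap]
        rfl
      · -- s = 2
        by_cases h : c = '='
        · subst h
          rw [show OP_delta 2 '=' = 4 from by decide, show pvDeriv '=' (resOf 2) = resOf 4 from by decide]
          exact ih 4 (by decide)
        · rw [show pvDeriv c (resOf 2) = [] from by simp [pvDeriv, resOf, Ne.symm h],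
              show OP_delta 2 c = -1 from by simp [OP_delta, h], opLoop_trap]
          rfl
      · -- s = 3
        by_cases h : c = '='
        · subst h
          rw [show OP_delta 3 '=' = 5 from by decide, show pvDeriv '=' (resOf 3) = resOf 5 from by decide]
          exact ih 5 (by decide)
        · rw [show pvDeriv c (resOf 3) = [] from by simp [pvDeriv, resOf, Ne.symm h],
              show OP_delta 3 c = -1 from by simp [OP_delta, h], opLoop_trap]
          rfl
      · -- s = 4 (no outgoing transitions)
        rw [show pvDeriv c (resOf 4) = [] from rfl,
            show OP_delta 4 c = -1 from by simp [OP_delta], opLoop_trap]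
        rfl
      · -- s = 5 (no outgoing transitions)
        rw [show pvDeriv c (resOf 5) = [] from rfl,
            show OP_delta 5 c = -1 from by simp [OP_delta], opLoop_trap]
        rfl
      · -- s = 6
        by_cases h : c = 'o'
        · subst h
          rw [show OP_delta 6 'o' = 7 from by decide, show pvDeriv 'o' (resOf 6) = resOf 7 from by decide]
          exact ih 7 (by decide)
        · rw [show pvDeriv c (resOf 6) = [] from by simp [pvDeriv, resOf, Ne.symm h],
              show OP_delta 6 c = -1 from by simp [OP_delta, h], opLoop_trap]
          rfl
      · -- s = 7
        by_cases h : c = 'd'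
        · subst h
          rw [show OP_delta 7 'd' = 8 from by decide, show pvDeriv 'd' (resOf 7) = resOf 8 from by decide]
          exact ih 8 (by decide)
        · rw [show pvDeriv c (resOf 7) = [] from by simp [pvDeriv, resOf, Ne.symm h],
              show OP_delta 7 c = -1 from by simp [OP_delta, h], opLoop_trap]
          rfl
      · -- s = 8 (no outgoing transitions)
        rw [show pvDeriv c (resOf 8) = [] from rfl,
            show OP_delta 8 c = -1 from by simp [OP_delta], opLoop_trap]
        rfl
      · -- s = 9
        by_cases h : c = 'i'
        · subst h
          rw [show OP_delta 9 'i' = 10 from by decide, show pvDeriv 'i' (resOf 9) = resOf 10 from by decide]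
          exact ih 10 (by decide)
        · rw [show pvDeriv c (resOf 9) = [] from by simp [pvDeriv, resOf, Ne.symm h],
              show OP_delta 9 c = -1 from by simp [OP_delta, h], opLoop_trap]
          rfl
      · -- s = 10
        by_cases h : c = 'v'
        · subst h
          rw [show OP_delta 10 'v' = 11 from by decide, show pvDeriv 'v' (resOf 10) = resOf 11 from by decide]
          exact ih 11 (by decide)
        · rw [show pvDeriv c (resOf 10) = [] from by simp [pvDeriv, resOf, Ne.symm h],
              show OP_delta 10 c = -1 from by simp [OP_delta, h], opLoop_trap]
          rfl
      · -- s = 11 (no outgoing transitions)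
        rw [show pvDeriv c (resOf 11) = [] from rfl,
            show OP_delta 11 c = -1 from by simp [OP_delta], opLoop_trap]
        rfl
      · -- s = 13
        by_cases h : c = '='
        · subst h
          rw [show OP_delta 13 '=' = 14 from by decide, show pvDeriv '=' (resOf 13) = resOf 14 from by decide]
          exact ih 14 (by decide)
        · rw [show pvDeriv c (resOf 13) = [] from by simp [pvDeriv, resOf, Ne.symm h],
              show OP_delta 13 c = -1 from by simp [OP_delta, h], opLoop_trap]
          rfl
      · -- s = 14 (no outgoing transitions)
        rw [show pvDeriv c (resOf 14) = [] from rfl,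
            show OP_delta 14 c = -1 from by simp [OP_delta], opLoop_trap]
        rfl
      · -- s = 15
        by_cases h : c = 'r'
        · subst h
          rw [show OP_delta 15 'r' = 16 from by decide, show pvDeriv 'r' (resOf 15) = resOf 16 from by decide]
          exact ih 16 (by decide)
        · rw [show pvDeriv c (resOf 15) = [] from by simp [pvDeriv, resOf, Ne.symm h],
              show OP_delta 15 c = -1 from by simp [OP_delta, h], opLoop_trap]
          rfl
      · -- s = 16 (no outgoing transitions)
        rw [show pvDeriv c (resOf 16) = [] from rfl,
            show OP_delta 16 c = -1 from by simp [OP_delta], opLoop_trap]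
        rfl
      · -- s = 17
        by_cases h : c = 'n'
        · subst h
          rw [show OP_delta 17 'n' = 18 from by decide, show pvDeriv 'n' (resOf 17) = resOf 18 from by decide]
          exact ih 18 (by decide)
        · rw [show pvDeriv c (resOf 17) = [] from by simp [pvDeriv, resOf, Ne.symm h],
              show OP_delta 17 c = -1 from by simp [OP_delta, h], opLoop_trap]
          rfl
      · -- s = 18
        by_cases h : c = 'd'
        · subst h
          rw [show OP_delta 18 'd' = 19 from by decide, show pvDeriv 'd' (resOf 18) = resOf 19 from by decide]
          exact ih 19 (by decide)
        · rw [show pvDeriv c (resOf 18) = [] from by simp [pvDeriv, resOf, Ne.symm h],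
              show OP_delta 18 c = -1 from by simp [OP_delta, h], opLoop_trap]
          rfl
      · -- s = 19 (no outgoing transitions)
        rw [show pvDeriv c (resOf 19) = [] from rfl,
            show OP_delta 19 c = -1 from by simp [OP_delta], opLoop_trap]
        rfl

theorem OP_automata_spec : Claim_equal_OP_automata := by
  intro input _
  unfold Spec_OP_automata OP_automata_alt OP_automata
  have := main_lemma input.toList 0 (by decide)
  simpa [finCheck, resOf] using this
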